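-- pv_equiv track=rewrite | github.com/tkimweston/CCI | cpmi_16.py | removeEvenFromStack
-- ===== SOURCE A (Python) =====
-- def removeEvenFromStack(s):
--     temp = []
--     while s:
--         element = s.pop()
--         if element % 2 != 0:
--             temp.append(element)
--     while temp:
--         s.append(temp.pop())
--     return s
--
-- s="abc"
-- ===== SOURCE B (Python) =====
-- def removeEvenFromStack(s):
--     odds = [x for x in s if x % 2 != 0]
--     s.clear()
--     s.extend(odds)
--     return s
-- ===== Notes on version B (the rewrite author's own statement) =====
-- stated objective: simpler
-- what changed: Replaced A's two pop-based while-loops (pop everything into a temp stack, then pop it back to restore order) with a single forward filter comprehension plus an in-place clear/extend rebuild of the same list.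
import Mathlib
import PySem

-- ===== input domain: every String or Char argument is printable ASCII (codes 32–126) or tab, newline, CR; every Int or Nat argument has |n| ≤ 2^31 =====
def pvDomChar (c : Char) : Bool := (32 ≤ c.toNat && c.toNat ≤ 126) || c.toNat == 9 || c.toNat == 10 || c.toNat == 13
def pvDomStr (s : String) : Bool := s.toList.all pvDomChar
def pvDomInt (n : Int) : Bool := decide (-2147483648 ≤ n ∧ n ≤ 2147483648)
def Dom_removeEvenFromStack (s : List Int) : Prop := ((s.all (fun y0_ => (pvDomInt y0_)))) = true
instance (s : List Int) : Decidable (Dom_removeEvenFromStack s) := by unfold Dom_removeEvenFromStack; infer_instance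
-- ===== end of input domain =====

-- B replaces A's two pop-based while-loops with a single forward filter (simpler); the Python B
-- rebuilds the SAME list object in place (clear/extend) — the equivalence proved here is about the
-- return value.

-- ===== PORT A =====
-- first while-loop: pop from the end of s; odd elements are appended to temp
def removeEvenLoop1 (s temp : List Int) : List Int :=
  match h : s.getLast? with
  | none => temp
  | some element =>
      removeEvenLoop1 s.dropLast (if element % 2 ≠ 0 then temp ++ [element] else temp)
termination_by s.length
decreasing_by
  have hne : s ≠ [] := by intro hs; simp [hs] at h
  simp [List.length_dropLast]
  exact List.length_pos_iff.mpr hne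

-- second while-loop: pop from the end of temp; append onto s (s is empty after loop 1)
def removeEvenLoop2 (temp s : List Int) : List Int :=
  match h : temp.getLast? with
  | none => s
  | some element => removeEvenLoop2 temp.dropLast (s ++ [element])
termination_by temp.length
decreasing_by
  have hne : temp ≠ [] := by intro hs; simp [hs] at h
  simp [List.length_dropLast]
  exact List.length_pos_iff.mpr hne

def removeEvenFromStack (s : List Int) : List Int :=
  removeEvenLoop2 (removeEvenLoop1 s []) []

-- ===== PORT B =====
def removeEvenFromStack_alt (s : List Int) : List Int :=
  s.filter (fun x => x % 2 ≠ 0)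

-- ===== PRECONDITION & SPEC =====
def Spec_removeEvenFromStack (s : List Int) (out : List Int) : Prop := out = removeEvenFromStack_alt s
instance (s : List Int) (out : List Int) : Decidable (Spec_removeEvenFromStack s out) := by unfold Spec_removeEvenFromStack; infer_instance

-- ===== CLAIM (what is proved, stated in full; the proofs are below) =====
def Claim_equal_removeEvenFromStack : Prop := ∀ (s : List Int), Dom_removeEvenFromStack s → Spec_removeEvenFromStack s (removeEvenFromStack s)

-- ===== LEMMAS AND PROOFS =====
theorem removeEvenLoop1_eq (s temp : List Int) :
    removeEvenLoop1 s temp = temp ++ (s.filter (fun x => x % 2 ≠ 0)).reverse := by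
  induction s using List.reverseRecOn generalizing temp with
  | nil => rw [removeEvenLoop1.eq_def]; simp
  | append_singleton s a ih =>
      rw [removeEvenLoop1.eq_def]
      split
      · next h => simp at h
      · next element h =>
          rw [List.getLast?_concat] at h
          cases h
          simp only [List.dropLast_concat]
          rw [ih]
          by_cases hodd : a % 2 = 0
          · simp [hodd, List.filter_append]
          · have h1 : a % 2 = 1 := by omega
            simp [hodd, h1, List.filter_append]

theorem removeEvenLoop2_eq (temp s : List Int) :
    removeEvenLoop2 temp s = s ++ temp.reverse := by
  induction temp using List.reverseRecOn generalizing s with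
  | nil => rw [removeEvenLoop2.eq_def]; simp
  | append_singleton t a ih =>
      rw [removeEvenLoop2.eq_def]
      split
      · next h => simp at h
      · next element h =>
          rw [List.getLast?_concat] at h
          cases h
          simp only [List.dropLast_concat]
          rw [ih]; simp

-- ===== VERDICT (by name: the statement is the Claim_ definition above) =====
theorem removeEvenFromStack_spec : Claim_equal_removeEvenFromStack := by
  intro s _
  unfold Spec_removeEvenFromStack removeEvenFromStack removeEvenFromStack_alt
  rw [removeEvenLoop1_eq, removeEvenLoop2_eq]
  simp
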